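-- pv_equiv track=rewrite | github.com/francois07/advent-of-code-2020 | day10/d10p1.py | use_all_adapters
-- ===== SOURCE A (Python) =====
-- def find_choices(data, jolts):
--     return [x for x in data if 0 < (x-jolts) <= 3]
--
-- def use_all_adapters(data, outlet=0):
--     jolts = outlet
--     adapters = [outlet]
--     while jolts < max(data)+3:
--         choices = find_choices(data, jolts)
--         if len(choices) > 0:
--             adapter = min(choices)
--         else:
--             adapter = max(data)+3
--         adapters.append(adapter)
--         jolts = adapter
--     return adapters
-- ===== SOURCE B (Python) =====
-- def use_all_adapters(data, outlet=0):
--     top = max(data) + 3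
--     cur = outlet
--     out = [outlet]
--     for x in sorted(set(data)):
--         if x <= cur:
--             continue
--         if x - cur > 3:
--             break
--         out.append(x)
--         cur = x
--     if cur < top:
--         out.append(top)
--     return out
-- ===== Notes on version B (the rewrite author's own statement) =====
-- stated objective: alternative
-- what changed: A rescans the whole list every step (find_choices + min per appended adapter); B sorts the distinct values once and does a single linear walk taking the next value within 3 jolts, stopping at the first larger gap.
-- outside the precondition, e.g. on use_all_adapters([], 0): A raises ValueError, B raises ValueError
import Mathlib
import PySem

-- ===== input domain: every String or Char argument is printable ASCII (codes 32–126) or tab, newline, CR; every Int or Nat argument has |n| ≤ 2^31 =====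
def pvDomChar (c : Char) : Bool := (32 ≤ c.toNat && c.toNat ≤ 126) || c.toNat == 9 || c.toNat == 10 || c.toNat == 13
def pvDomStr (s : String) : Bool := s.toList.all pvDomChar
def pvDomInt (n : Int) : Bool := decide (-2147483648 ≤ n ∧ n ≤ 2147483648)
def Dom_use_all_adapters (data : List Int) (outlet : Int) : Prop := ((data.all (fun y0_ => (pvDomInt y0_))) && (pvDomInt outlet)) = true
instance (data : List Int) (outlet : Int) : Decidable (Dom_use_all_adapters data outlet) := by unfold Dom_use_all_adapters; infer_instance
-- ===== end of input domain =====

-- B sorts the distinct adapter values once and walks them linearly instead of rescanning the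
-- whole list for each appended adapter as A does (objective: alternative algorithm, sort-then-scan).


-- ===== PORT A =====
-- [x for x in data if 0 < (x-jolts) <= 3]
def findChoices (data : List Int) (jolts : Int) : List Int :=
  data.filter (fun x => decide (0 < x - jolts) && decide (x - jolts ≤ 3))

-- the while loop of A; Python's max(data) raises on [], here .getD 0 (excluded by Pre_)
def uaaLoop (data : List Int) (jolts : Int) (adapters : List Int) : List Int :=
  if _h : jolts < (PySem.List.max? data (fun x => x)).getD 0 + 3 then
    match hm : PySem.List.min? (findChoices data jolts) (fun x => x) with
    | some a => uaaLoop data a (adapters ++ [a])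
    | none =>
        uaaLoop data ((PySem.List.max? data (fun x => x)).getD 0 + 3)
          (adapters ++ [(PySem.List.max? data (fun x => x)).getD 0 + 3])
  else adapters
termination_by ((PySem.List.max? data (fun x => x)).getD 0 + 3 - jolts).toNat
decreasing_by
  · have ha := PySem.List.min?_mem hm
    have := List.of_mem_filter ha
    simp at this
    omega
  · omega

def use_all_adapters (data : List Int) (outlet : Int) : List Int :=
  uaaLoop data outlet [outlet]

-- ===== PORT B =====
-- the for-loop of B: skip values ≤ cur, take a value within 3 jolts, break at a larger gap
def uaaWalk (s : List Int) (cur : Int) (out : List Int) : Int × List Int :=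
  match s with
  | [] => (cur, out)
  | x :: xs =>
      if x ≤ cur then uaaWalk xs cur out
      else if x - cur > 3 then (cur, out)
      else uaaWalk xs x (out ++ [x])

def use_all_adapters_alt (data : List Int) (outlet : Int) : List Int :=
  let top := (PySem.List.max? data (fun x => x)).getD 0 + 3
  let r := uaaWalk (PySem.List.sorted (PySem.Set.ofList data) (fun x => x) false) outlet [outlet]
  if r.1 < top then r.2 ++ [top] else r.2

-- ===== PRECONDITION & SPEC =====
-- Python A raises ValueError (max of empty sequence) on data = []; excluded.
def Pre_use_all_adapters (data : List Int) (outlet : Int) : Prop := data ≠ []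
instance (data : List Int) (outlet : Int) : Decidable (Pre_use_all_adapters data outlet) := by unfold Pre_use_all_adapters; infer_instance
def pvWitness_use_all_adapters : List Int × Int := ([1, 2, 4], 0)

def Spec_use_all_adapters (data : List Int) (outlet : Int) (out : List Int) : Prop := out = use_all_adapters_alt data outlet
instance (data : List Int) (outlet : Int) (out : List Int) : Decidable (Spec_use_all_adapters data outlet out) := by unfold Spec_use_all_adapters; infer_instance

-- ===== CLAIM (what is proved, stated in full; the proofs are below) =====
def Claim_equal_use_all_adapters : Prop := ∀ (data : List Int) (outlet : Int), Dom_use_all_adapters data outlet → Pre_use_all_adapters data outlet → Spec_use_all_adapters data outlet (use_all_adapters data outlet)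

-- ===== LEMMAS AND PROOFS =====

-- on a strictly increasing list, pre-filtering the values ≤ cur does not change the walk
lemma walk_filter (s : List Int) (cur : Int) (out : List Int)
    (hs : s.Pairwise (· < ·)) :
    uaaWalk s cur out = uaaWalk (s.filter (fun x => decide (cur < x))) cur out := by
  induction s generalizing cur out with
  | nil => rfl
  | cons x xs ih =>
      rcases List.pairwise_cons.mp hs with ⟨hx, hxs⟩
      by_cases hle : x ≤ cur
      · simp [uaaWalk, hle, not_lt.mpr hle]
        exact ih cur out hxs
      · have hfx : (xs.filter (fun y => decide (cur < y))) = xs := by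
          apply List.filter_eq_self.mpr
          intro y hy
          have := hx y hy
          simp; omega
        simp [uaaWalk, hle, not_le.mp hle, hfx]

-- A's loop, run from any jolts, equals B's walk over the sorted distinct values above jolts
lemma loop_eq_walk (data : List Int) (m : Int)
    (hm : PySem.List.max? data (fun x => x) = some m) :
    ∀ (n : Nat) (jolts : Int) (acc : List Int), (m + 3 - jolts).toNat ≤ n →
      uaaLoop data jolts acc =
        (let r := uaaWalk
            ((PySem.List.sorted (PySem.Set.ofList data) (fun x => x) false).filter
              (fun x => decide (jolts < x))) jolts acc
         if r.1 < m + 3 then r.2 ++ [m + 3] else r.2) := by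
  have hmax : ∀ x ∈ data, x ≤ m := PySem.List.max?_isMax hm
  have hchain : (PySem.List.sorted (PySem.Set.ofList data) (fun x => x) false).Pairwise (· < ·) :=
    PySem.List.sorted_ofList_pairwise_lt data
  have hmemS : ∀ x : Int, x ∈ PySem.List.sorted (PySem.Set.ofList data) (fun x => x) false ↔ x ∈ data := by
    intro x
    simp [PySem.List.mem_sorted, PySem.Set.mem_ofList]
  set s := PySem.List.sorted (PySem.Set.ofList data) (fun x => x) false with hs
  intro n
  induction n with
  | zero =>
      intro jolts acc hle
      have hj : ¬ jolts < m + 3 := by omega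
      have hfil : s.filter (fun x => decide (jolts < x)) = [] := by
        apply List.filter_eq_nil_iff.mpr
        intro x hx
        have := hmax x ((hmemS x).mp hx)
        simp; omega
      rw [uaaLoop]
      simp only [hm, Option.getD_some, dif_neg hj, hfil, uaaWalk]
      simp [hj]
  | succ n ih =>
      intro jolts acc hle
      by_cases hj : jolts < m + 3
      · rcases ht : s.filter (fun x => decide (jolts < x)) with _ | ⟨h, rest⟩
        · -- no value above jolts at all: choices empty, A jumps to m+3 and stops
          have hch : findChoices data jolts = [] := by
            apply List.filter_eq_nil_iff.mpr
            intro x hx hpx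
            simp at hpx
            have : x ∈ s.filter (fun x => decide (jolts < x)) := by
              rw [List.mem_filter]
              exact ⟨(hmemS x).mpr hx, by simp; omega⟩
            rw [ht] at this
            simp at this
          have hnone : PySem.List.min? (findChoices data jolts) (fun x => x) = none := by
            rw [hch, PySem.List.min?_eq_none_iff]
          rw [uaaLoop]
          simp only [hm, Option.getD_some, dif_pos hj]
          split
          · next a heq => rw [hnone] at heq; exact absurd heq (by simp)
          · rw [uaaLoop]
            simp only [hm, Option.getD_some, lt_self_iff_false, dite_false, uaaWalk]
            simp [hj]
        · have htp : (s.filter (fun x => decide (jolts < x))).Pairwise (· < ·) :=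
            List.Pairwise.filter _ hchain
          rw [ht] at htp
          rcases List.pairwise_cons.mp htp with ⟨hrest, _⟩
          have hhmem : h ∈ s ∧ jolts < h := by
            have : h ∈ s.filter (fun x => decide (jolts < x)) := by rw [ht]; simp
            rw [List.mem_filter] at this
            exact ⟨this.1, by simpa using this.2⟩
          have hmin_t : ∀ x ∈ s, jolts < x → h ≤ x := by
            intro x hx hjx
            have : x ∈ s.filter (fun x => decide (jolts < x)) := by
              rw [List.mem_filter]; exact ⟨hx, by simp; omega⟩
            rw [ht] at this
            rcases this with _ | hr
            · omega
            · exact le_of_lt (hrest x (by assumption))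
          by_cases hcl : h ≤ jolts + 3
          · -- h is within reach: A picks exactly h
            have hhc : h ∈ findChoices data jolts := by
              rw [findChoices, List.mem_filter]
              refine ⟨(hmemS h).mp hhmem.1, by simp; omega⟩
            rcases hminv : PySem.List.min? (findChoices data jolts) (fun x => x) with _ | c
            · rw [PySem.List.min?_eq_none_iff] at hminv
              rw [hminv] at hhc
              simp at hhc
            · have hc_ch := PySem.List.min?_mem hminv
              rw [findChoices, List.mem_filter] at hc_ch
              have hc_data := hc_ch.1
              have hc_rng : jolts < c ∧ c - jolts ≤ 3 := by
                have := hc_ch.2; simp at this; omega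
              have hch : c = h := by
                have h1 : c ≤ h := PySem.List.min?_isMin hminv h hhc
                have h2 : h ≤ c := hmin_t c ((hmemS c).mpr hc_data) hc_rng.1
                omega
              have hch2 : PySem.List.min? (findChoices data jolts) (fun x => x) = some h := by
                rw [hminv, hch]
              rw [uaaLoop]
              simp only [hm, Option.getD_some, dif_pos hj]
              have hrec : s.filter (fun x => decide (h < x)) = rest := by
                have e1 : s.filter (fun x => decide (h < x)) =
                    (s.filter (fun x => decide (jolts < x))).filter (fun x => decide (h < x)) := by
                  rw [List.filter_filter]
                  apply List.filter_congr
                  intro x _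
                  by_cases hx : h < x
                  · simp [hx]; omega
                  · simp [hx]
                rw [e1, ht]
                simp only [List.filter_cons, decide_eq_true_eq, lt_self_iff_false, if_false]
                exact List.filter_eq_self.mpr (fun y hy => by simp; exact hrest y hy)
              split
              · next a heq =>
                  rw [hch2] at heq
                  injection heq with heq
                  subst heq
                  rw [ih h (acc ++ [h]) (by omega)]
                  simp only [hrec, uaaWalk]
                  have h1 : ¬ h ≤ jolts := by omega
                  have h2 : ¬ h - jolts > 3 := by omega
                  simp [h1, h2]
              · next heq => rw [hch2] at heq; exact absurd heq (by simp)
          · -- the nearest value above jolts is out of reach: choices empty, A jumps to m+3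
            have hch : findChoices data jolts = [] := by
              apply List.filter_eq_nil_iff.mpr
              intro x hx hpx
              simp at hpx
              have := hmin_t x ((hmemS x).mpr hx) (by omega)
              omega
            have hnone : PySem.List.min? (findChoices data jolts) (fun x => x) = none := by
              rw [hch, PySem.List.min?_eq_none_iff]
            rw [uaaLoop]
            simp only [hm, Option.getD_some, dif_pos hj]
            split
            · next a heq => rw [hnone] at heq; exact absurd heq (by simp)
            · rw [uaaLoop]
              simp only [hm, Option.getD_some, lt_self_iff_false, dite_false, uaaWalk]
              have h1 : ¬ h ≤ jolts := by omega
              have h2 : h - jolts > 3 := by omega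
              simp [h1, h2, hj]
      · have hfil : s.filter (fun x => decide (jolts < x)) = [] := by
          apply List.filter_eq_nil_iff.mpr
          intro x hx
          have := hmax x ((hmemS x).mp hx)
          simp; omega
        rw [uaaLoop]
        simp only [hm, Option.getD_some, dif_neg hj, hfil, uaaWalk]
        simp [hj]

theorem use_all_adapters_spec_aux (data : List Int) (outlet : Int)
    (hpre : data ≠ []) :
    use_all_adapters data outlet = use_all_adapters_alt data outlet := by
  rcases hmv : PySem.List.max? data (fun x => x) with _ | m
  · rw [PySem.List.max?_eq_none_iff] at hmv
    exact absurd hmv hpre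
  · have hchain : (PySem.List.sorted (PySem.Set.ofList data) (fun x => x) false).Pairwise (· < ·) :=
      PySem.List.sorted_ofList_pairwise_lt data
    rw [use_all_adapters, use_all_adapters_alt]
    rw [loop_eq_walk data m hmv ((m + 3 - outlet).toNat) outlet [outlet] (le_refl _)]
    rw [← walk_filter _ _ _ hchain]
    simp only [hmv, Option.getD_some]

-- ===== VERDICT (by name: the statement is the Claim_ definition above) =====
theorem use_all_adapters_spec : Claim_equal_use_all_adapters := by
  intro data outlet _ hpre
  exact use_all_adapters_spec_aux data outlet hpre
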